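-- pv_equiv track=rewrite | github.com/THSSIR18/cis2300-p7-scrabble | project7.py | getDictOfScores
-- ===== SOURCE A (Python) =====
-- def getScrabbleLetterScore(letter):
--   if letter=='a' or letter=='e' or letter=='i' or letter=='o' or letter=='u' or letter=='n' or letter=='r' or letter=='t' or letter=='l' or letter=='s':
--     return 1
--   elif letter=='d' or letter=='g':
--     return 2
--   elif letter=='b' or letter=='c' or letter=='m' or letter=='p':
--     return 3
--   elif letter=='f' or letter=='h' or letter=='v' or letter=='w' or letter=='y':
--     return 4
--   elif letter=='k':
--     return 5
--   elif letter=='j' or letter=='x':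
--     return 8
--   elif letter=='q' or letter=='z':
--     return 10
--   else:
--     return 0
--
-- def getScrabbleWordScore(word):
--   score=0
--   for letter in word:
--     score+=getScrabbleLetterScore(letter)
--   return score
--
-- def getDictOfScores(wordList):
--   dic={}
--   new_list=[]
--   for word in wordList:
--     score=getScrabbleWordScore(word)
--     if score in dic:
--       dic[score]+=1
--     elif score not in dic:
--       dic[score]=1
--   keymax=max(dic, key=dic.get)
--   for word in wordList:
--     if getScrabbleWordScore(word)==keymax:
--       new_list.append(word)
--   return new_list
-- ===== SOURCE B (Python) =====
-- def getScrabbleLetterScore(letter):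
--   if letter=='a' or letter=='e' or letter=='i' or letter=='o' or letter=='u' or letter=='n' or letter=='r' or letter=='t' or letter=='l' or letter=='s':
--     return 1
--   elif letter=='d' or letter=='g':
--     return 2
--   elif letter=='b' or letter=='c' or letter=='m' or letter=='p':
--     return 3
--   elif letter=='f' or letter=='h' or letter=='v' or letter=='w' or letter=='y':
--     return 4
--   elif letter=='k':
--     return 5
--   elif letter=='j' or letter=='x':
--     return 8
--   elif letter=='q' or letter=='z':
--     return 10
--   else:
--     return 0
--
-- def getScrabbleWordScore(word):
--   score=0
--   for letter in word:
--     score+=getScrabbleLetterScore(letter)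
--   return score
--
-- def getDictOfScores(wordList):
--   groups={}
--   for word in wordList:
--     groups.setdefault(getScrabbleWordScore(word), []).append(word)
--   best=max(groups, key=lambda s: len(groups[s]))
--   return groups[best]
-- ===== Notes on version B (the rewrite author's own statement) =====
-- stated objective: faster
-- what changed: B groups words by score into a dict of lists in one pass and returns the longest group (max by group length, first-insertion tie-break), instead of A's count dict followed by a second full scan that rescores every word; Pre_ excludes the empty list, on which both A and B raise ValueError from max().
import Mathlib
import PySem

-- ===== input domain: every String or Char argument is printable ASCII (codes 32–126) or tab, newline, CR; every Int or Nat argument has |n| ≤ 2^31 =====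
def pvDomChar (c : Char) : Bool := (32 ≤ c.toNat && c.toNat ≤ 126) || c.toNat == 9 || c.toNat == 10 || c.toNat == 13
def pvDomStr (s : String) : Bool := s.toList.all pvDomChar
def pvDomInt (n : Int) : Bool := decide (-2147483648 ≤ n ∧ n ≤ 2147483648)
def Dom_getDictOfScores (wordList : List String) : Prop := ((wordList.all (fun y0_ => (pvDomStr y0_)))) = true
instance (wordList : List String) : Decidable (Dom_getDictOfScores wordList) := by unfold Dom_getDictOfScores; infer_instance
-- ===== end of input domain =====

-- B groups words by score into a dict of lists in one pass and returns the longest group,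
-- instead of A's count dict followed by a second rescoring scan (objective: fewer passes).

-- ===== PORT A =====
def scrabbleLetterScore (letter : Char) : Int :=
  if letter = 'a' ∨ letter = 'e' ∨ letter = 'i' ∨ letter = 'o' ∨ letter = 'u' ∨ letter = 'n' ∨ letter = 'r' ∨ letter = 't' ∨ letter = 'l' ∨ letter = 's' then 1
  else if letter = 'd' ∨ letter = 'g' then 2
  else if letter = 'b' ∨ letter = 'c' ∨ letter = 'm' ∨ letter = 'p' then 3
  else if letter = 'f' ∨ letter = 'h' ∨ letter = 'v' ∨ letter = 'w' ∨ letter = 'y' then 4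
  else if letter = 'k' then 5
  else if letter = 'j' ∨ letter = 'x' then 8
  else if letter = 'q' ∨ letter = 'z' then 10
  else 0

def scrabbleWordScore (word : String) : Int :=
  word.toList.foldl (fun score letter => score + scrabbleLetterScore letter) 0

def getDictOfScores (wordList : List String) : List String :=
  let dic : PySem.Dict Int Int := wordList.foldl (fun d word =>
    let score := scrabbleWordScore word
    if d.contains score then d.insert score (d.getD score 0 + 1)
    else if !(d.contains score) then d.insert score 1
    else d) PySem.Dict.empty
  match PySem.List.max? dic.keys (fun k => dic.getD k 0) with
  | none => []   -- Python raises ValueError here (empty wordList); excluded by Pre_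
  | some keymax =>
    wordList.foldl (fun nl word =>
      if scrabbleWordScore word = keymax then nl ++ [word] else nl) []

-- ===== PORT B =====
def getDictOfScores_alt (wordList : List String) : List String :=
  let groups : PySem.Dict Int (List String) := wordList.foldl (fun d word =>
    d.modify (scrabbleWordScore word) [] (fun l => l ++ [word])) PySem.Dict.empty
  match PySem.List.max? groups.keys (fun k => ((groups.getD k []).length : Int)) with
  | none => []   -- Python raises ValueError here (empty wordList); excluded by Pre_
  | some best => groups.getD best []

-- ===== PRECONDITION & SPEC =====
-- Pre_ excludes only the empty list, on which both A and B raise ValueError from max().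
def Pre_getDictOfScores (wordList : List String) : Prop := wordList ≠ []
instance (wordList : List String) : Decidable (Pre_getDictOfScores wordList) := by unfold Pre_getDictOfScores; infer_instance
def pvWitness_getDictOfScores : List String := (["ab", "ba", "zz"])

def Spec_getDictOfScores (wordList : List String) (out : List String) : Prop := out = getDictOfScores_alt wordList
instance (wordList : List String) (out : List String) : Decidable (Spec_getDictOfScores wordList out) := by unfold Spec_getDictOfScores; infer_instance

-- ===== CLAIM (what is proved, stated in full; the proofs are below) =====
def Claim_equal_getDictOfScores : Prop := ∀ (wordList : List String), Dom_getDictOfScores wordList → Pre_getDictOfScores wordList → Spec_getDictOfScores wordList (getDictOfScores wordList)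

-- ===== LEMMAS AND PROOFS =====

theorem dicA_eq (wordList : List String) (score : String → Int) :
    wordList.foldl (fun d word =>
      let s := score word
      if d.contains s then d.insert s (d.getD s 0 + 1)
      else if !(d.contains s) then d.insert s 1
      else d) PySem.Dict.empty
    = PySem.Dict.counter (wordList.map score) := by
  rw [show (fun (d : PySem.Dict Int Int) word =>
      let s := score word
      if d.contains s then d.insert s (d.getD s 0 + 1)
      else if !(d.contains s) then d.insert s 1
      else d) = (fun d word => d.insert (score word) (d.getD (score word) 0 + 1)) from
    funext fun d => funext fun w => by
      by_cases h : d.contains (score w)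
      · simp [h]
      · simp [h, PySem.Dict.getD_of_not_contains (d := d) (d0 := (0:Int)) (by simpa using h)]]
  rw [← List.foldl_map (f := score) (g := fun (d : PySem.Dict Int Int) s => d.insert s (d.getD s 0 + 1)), PySem.Dict.foldl_insert_getD_add_one_eq_counter]

theorem groupsB_getD (wordList : List String) (score : String → Int) (k : Int) :
    (wordList.foldl (fun d word =>
      d.modify (score word) [] (fun l => l ++ [word])) PySem.Dict.empty).getD k []
    = wordList.filter (fun w => score w == k) := by
  have h := PySem.Dict.getD_foldl_modify_append
    (wordList.map (fun w => (score w, w))) (PySem.Dict.empty) k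
  rw [List.foldl_map] at h
  simpa [List.filter_map, List.map_map, Function.comp_def] using h

theorem groupsB_keys (wordList : List String) (score : String → Int) :
    (wordList.foldl (fun d word =>
      d.modify (score word) [] (fun l => l ++ [word])) PySem.Dict.empty).keys
    = PySem.Set.ofList (wordList.map score) := by
  rw [PySem.Dict.keys_foldl_modify_key wordList score [] (fun _ w l => l ++ [w])]
  simp [PySem.Set.update_nil_left, PySem.Dict.keys_empty]

-- ===== VERDICT (by name: the statement is the Claim_ definition above) =====
theorem getDictOfScores_spec : Claim_equal_getDictOfScores := by
  intro wl _ _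
  show getDictOfScores wl = getDictOfScores_alt wl
  unfold getDictOfScores getDictOfScores_alt
  simp only [dicA_eq, groupsB_keys, groupsB_getD, PySem.Dict.keys_counter, PySem.Dict.getD_counter]
  have hk : (fun k => ((wl.filter (fun w => scrabbleWordScore w == k)).length : Int))
      = (fun k => ((wl.map scrabbleWordScore).count k : Int)) := by
    funext k
    simp [List.count_eq_countP, List.countP_map, Function.comp_def, ← List.countP_eq_length_filter]
  rw [hk]
  cases hm : PySem.List.max? (PySem.Set.ofList (wl.map scrabbleWordScore))
      (fun k => ((wl.map scrabbleWordScore).count k : Int)) with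
  | none => rfl
  | some keymax =>
    show List.foldl _ [] wl = List.filter _ wl
    rw [show (fun (nl : List String) word => if scrabbleWordScore word = keymax then nl ++ [word] else nl)
        = (fun nl word => if (scrabbleWordScore word == keymax) = true then nl ++ [word] else nl) from
      funext fun nl => funext fun w => by simp]
    rw [PySem.List.foldl_append_if (p := fun w => scrabbleWordScore w == keymax) (f := fun w => w)]
    simp
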